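-- pv_equiv track=rewrite | github.com/Reverier-Xu/ISAE | DataFlowPanel/Modules/TapModule.py | TapEncode
-- ===== SOURCE A (Python) =====
-- def TapEncode(text):
--     table = {'A': 11, 'B': 12, 'C': 13, 'D': 14, 'E': 15,
--              'F': 21, 'G': 22, 'H': 23, 'I': 24, 'J': 25,
--              'L': 31, 'M': 32, 'N': 33, 'O': 34, 'P': 35,
--              'Q': 41, 'R': 42, 'S': 43, 'T': 44, 'U': 45,
--              'V': 51, 'W': 52, 'X': 53, 'Y': 54, 'Z': 55,
--              'a': 11, 'b': 12, 'c': 13, 'd': 14, 'e': 15,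
--              'f': 21, 'g': 22, 'h': 23, 'i': 24, 'j': 25,
--              'l': 31, 'm': 32, 'n': 33, 'o': 34, 'p': 35,
--              'q': 41, 'r': 42, 's': 43, 't': 44, 'u': 45,
--              'v': 51, 'w': 52, 'x': 53, 'y': 54, 'z': 55,
--              'K': 13, 'k': 13}
--     output = ''
--     for i in text:
--         output += str(table[i]) + ' '
--     return output
-- ===== SOURCE B (Python) =====
-- def TapEncode(text):
--     out = []
--     for c in text:
--         u = c.upper()
--         if not ('A' <= u <= 'Z'):
--             raise KeyError(c)
--         if u == 'K':
--             idx = 2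
--         else:
--             idx = ord(u) - 65
--             if idx > 10:
--                 idx -= 1
--         out.append(str((idx // 5 + 1) * 10 + idx % 5 + 1) + ' ')
--     return ''.join(out)
-- ===== Notes on version B (the rewrite author's own statement) =====
-- stated objective: idiomatic
-- what changed: Replaced the 52-entry literal lookup table with an arithmetic closed form over the 5x5 tap-code grid (uppercase, fold K into C, then row/column = idx//5, idx%5), joining per-char codes instead of repeated string concatenation.
import Mathlib
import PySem

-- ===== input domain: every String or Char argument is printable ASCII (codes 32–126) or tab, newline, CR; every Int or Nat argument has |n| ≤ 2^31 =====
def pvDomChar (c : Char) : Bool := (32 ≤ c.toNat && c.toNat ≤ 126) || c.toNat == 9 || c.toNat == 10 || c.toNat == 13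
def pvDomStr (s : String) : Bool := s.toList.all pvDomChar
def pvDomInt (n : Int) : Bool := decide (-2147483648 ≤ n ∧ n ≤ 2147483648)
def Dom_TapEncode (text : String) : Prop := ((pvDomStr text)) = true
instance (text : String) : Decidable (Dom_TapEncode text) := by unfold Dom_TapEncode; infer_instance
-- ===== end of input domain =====

-- B replaces A's 52-entry lookup table with an arithmetic closed form over the tap-code grid (idiomatic, same cost).
-- Both programs raise KeyError on any character that is not an ASCII letter; Pre_ excludes exactly those inputs.

-- ===== PORT A =====
-- the Python dict, in insertion order
def tapTable : PySem.Dict Char Int := PySem.Dict.ofList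
  [('A', 11), ('B', 12), ('C', 13), ('D', 14), ('E', 15),
   ('F', 21), ('G', 22), ('H', 23), ('I', 24), ('J', 25),
   ('L', 31), ('M', 32), ('N', 33), ('O', 34), ('P', 35),
   ('Q', 41), ('R', 42), ('S', 43), ('T', 44), ('U', 45),
   ('V', 51), ('W', 52), ('X', 53), ('Y', 54), ('Z', 55),
   ('a', 11), ('b', 12), ('c', 13), ('d', 14), ('e', 15),
   ('f', 21), ('g', 22), ('h', 23), ('i', 24), ('j', 25),
   ('l', 31), ('m', 32), ('n', 33), ('o', 34), ('p', 35),
   ('q', 41), ('r', 42), ('s', 43), ('t', 44), ('u', 45),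
   ('v', 51), ('w', 52), ('x', 53), ('y', 54), ('z', 55),
   ('K', 13), ('k', 13)]

-- string concatenation done on List Char (exact); table[i] raises KeyError on missing keys —
-- those inputs are outside Pre_, where we default to 0
def TapEncode (text : String) : String :=
  String.ofList
    (text.toList.foldl (fun output i => output ++ PySem.Int.toChars (tapTable.getD i 0) ++ [' ']) [])

-- ===== PORT B =====
-- c.upper() for a single char (exact on ASCII, which Dom_TapEncode guarantees)
def tapUpper (c : Char) : Char :=
  if 97 ≤ c.toNat ∧ c.toNat ≤ 122 then Char.ofNat (c.toNat - 32) else c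

-- one loop iteration of B: the appended piece for char c, as a List Char;
-- the non-letter branch raises KeyError in Python (outside Pre_), [] here
def tapPiece (c : Char) : List Char :=
  let u := tapUpper c
  if 65 ≤ u.toNat ∧ u.toNat ≤ 90 then
    let idx : Int :=
      if u = 'K' then 2
      else if (u.toNat : Int) - 65 > 10 then (u.toNat : Int) - 66 else (u.toNat : Int) - 65
    PySem.Int.toChars ((PySem.Int.floordiv idx 5 + 1) * 10 + PySem.Int.mod idx 5 + 1) ++ [' ']
  else []

-- ''.join(out), via PySem.Chars.join (exact)
def TapEncode_alt (text : String) : String :=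
  String.ofList (PySem.Chars.join [] (text.toList.map tapPiece))

-- ===== PRECONDITION & SPEC =====
-- Pre_ excludes exactly the inputs on which A (and B) raise KeyError: any character outside ASCII A-Z/a-z
def Pre_TapEncode (text : String) : Prop :=
  (text.toList.all fun c => (65 ≤ c.toNat && c.toNat ≤ 90) || (97 ≤ c.toNat && c.toNat ≤ 122)) = true
instance (text : String) : Decidable (Pre_TapEncode text) := by unfold Pre_TapEncode; infer_instance
def pvWitness_TapEncode : String := "HelloZk"

def Spec_TapEncode (text : String) (out : String) : Prop := out = TapEncode_alt text
instance (text : String) (out : String) : Decidable (Spec_TapEncode text out) := by unfold Spec_TapEncode; infer_instance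

-- ===== CLAIM (what is proved, stated in full; the proofs are below) =====
def Claim_equal_TapEncode : Prop := ∀ (text : String), Dom_TapEncode text → Pre_TapEncode text → Spec_TapEncode text (TapEncode text)

-- ===== LEMMAS AND PROOFS =====

-- per-character agreement: over the 52 letters, A's table value prints B's formula's piece
set_option maxRecDepth 10000 in
theorem tapPiece_eq (c : Char)
    (h : (65 ≤ c.toNat ∧ c.toNat ≤ 90) ∨ (97 ≤ c.toNat ∧ c.toNat ≤ 122)) :
    PySem.Int.toChars (tapTable.getD c 0) ++ [' '] = tapPiece c := by
  have hall : ∀ n ∈ List.range 26,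
      (PySem.Int.toChars (tapTable.getD (Char.ofNat (65 + n)) 0) ++ [' '] = tapPiece (Char.ofNat (65 + n)))
      ∧ (PySem.Int.toChars (tapTable.getD (Char.ofNat (97 + n)) 0) ++ [' '] = tapPiece (Char.ofNat (97 + n))) := by
    decide
  rcases h with ⟨h1, h2⟩ | ⟨h1, h2⟩
  · have hc : c = Char.ofNat (65 + (c.toNat - 65)) := by
      rw [show 65 + (c.toNat - 65) = c.toNat by omega, Char.ofNat_toNat]
    have := (hall (c.toNat - 65) (by simp only [List.mem_range]; omega)).1
    rwa [← hc] at this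
  · have hc : c = Char.ofNat (97 + (c.toNat - 97)) := by
      rw [show 97 + (c.toNat - 97) = c.toNat by omega, Char.ofNat_toNat]
    have := (hall (c.toNat - 97) (by simp only [List.mem_range]; omega)).2
    rwa [← hc] at this

-- A's left fold of appends is the flatten of the per-char pieces
theorem tap_foldl_flatten (g : Char → List Char) (l : List Char) (acc : List Char) :
    l.foldl (fun o c => o ++ g c) acc = acc ++ (l.map g).flatten := by
  induction l generalizing acc with
  | nil => simp
  | cons c t ih => simp [List.foldl, ih]

-- ''.join(pieces) is flatten
theorem tap_join_nil (ps : List (List Char)) : PySem.Chars.join [] ps = ps.flatten := by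
  induction ps with
  | nil => rfl
  | cons a t ih =>
    cases t with
    | nil => simp [PySem.Chars.join, List.intercalate]
    | cons b u =>
      simp only [PySem.Chars.join, List.intercalate, List.intersperse] at *
      simp_all

-- ===== VERDICT (by name: the statement is the Claim_ definition above) =====
theorem TapEncode_spec : Claim_equal_TapEncode := by
  intro text _ hpre
  have hpre' : ∀ c ∈ text.toList, (65 ≤ c.toNat ∧ c.toNat ≤ 90) ∨ (97 ≤ c.toNat ∧ c.toNat ≤ 122) := by
    simpa [Pre_TapEncode, List.all_eq_true, Bool.or_eq_true, Bool.and_eq_true,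
      decide_eq_true_iff] using hpre
  unfold Spec_TapEncode TapEncode TapEncode_alt
  rw [tap_join_nil]
  have hmap : text.toList.map (fun i => PySem.Int.toChars (tapTable.getD i 0) ++ [' '])
      = text.toList.map tapPiece := List.map_congr_left fun c hc => tapPiece_eq c (hpre' c hc)
  have := tap_foldl_flatten (fun i => PySem.Int.toChars (tapTable.getD i 0) ++ [' ']) text.toList []
  simp only [List.append_assoc] at this ⊢
  rw [this, hmap]
  simp
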